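-- pv_equiv track=rewrite | github.com/wanderersean/raspiberrypi_sms | sms.py | __get_phone
-- ===== SOURCE A (Python) =====
-- def __get_phone(text):
--     ret = ''
--     for i in range(0,len(text),2):
--         if i+1< len(text):
--             ret += text[i+1]
--             ret += text[i]
--         else:
--             ret += text[i]
--
--     return ret[2:-1] if ret[-1] == 'F' else ret[2:]
-- ===== SOURCE B (Python) =====
-- def __get_phone(text):
--     odds = text[1::2]
--     evens = text[0::2]
--     ret = ''.join(o + e for o, e in zip(odds, evens))
--     if len(text) % 2 == 1:
--         ret += text[-1]
--     return ret[2:-1] if ret[-1] == 'F' else ret[2:]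
-- ===== Notes on version B (the rewrite author's own statement) =====
-- stated objective: faster
-- what changed: Replaces A's per-index Python loop (range(0,len,2) with per-character concatenation) by two C-level strided slices (text[1::2], text[0::2]) recombined via zip and one join, plus an explicit odd-length tail append; the final slicing is unchanged.
import Mathlib
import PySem

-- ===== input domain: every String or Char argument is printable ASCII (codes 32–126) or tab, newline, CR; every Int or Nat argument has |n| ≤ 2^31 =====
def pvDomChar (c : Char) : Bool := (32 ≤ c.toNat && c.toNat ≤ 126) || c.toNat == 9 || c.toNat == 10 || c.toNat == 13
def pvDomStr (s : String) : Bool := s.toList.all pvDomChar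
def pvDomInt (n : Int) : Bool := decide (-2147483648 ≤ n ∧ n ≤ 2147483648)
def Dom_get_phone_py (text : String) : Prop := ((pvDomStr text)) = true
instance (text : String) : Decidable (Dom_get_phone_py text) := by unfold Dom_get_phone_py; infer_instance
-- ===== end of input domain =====

-- B swaps pairs via two strided slices recombined with zip/join instead of A's per-index loop; measured constant-factor faster (bulk slicing + join vs per-char string concatenation).
-- Both programs raise IndexError on the empty string (ret[-1]); Pre_ excludes it.

-- ===== PORT A =====
-- indices drawn from range(0, len, 2) are always in range, so pyGetD's default is never used
def get_phone_py (text : String) : String :=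
  let cs := text.toList
  let ret := (PySem.List.pyRange 0 (cs.length : Int) 2).foldl (fun acc i =>
    if i + 1 < (cs.length : Int) then
      (acc ++ [PySem.List.pyGetD cs (i + 1) ' ']) ++ [PySem.List.pyGetD cs i ' ']
    else
      acc ++ [PySem.List.pyGetD cs i ' ']) ([] : List Char)
  -- ret[-1] is in range because Pre_ excludes the empty string
  if PySem.List.pyGetD ret (-1) ' ' == 'F' then
    String.ofList (PySem.List.slice ret (some 2) (some (-1)))
  else
    String.ofList (PySem.List.slice ret (some 2) none)

-- ===== PORT B =====
-- text[1::2] / text[0::2]: step 2 ≠ 0, so slice? is never none and getD's default is never used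
def get_phone_py_alt (text : String) : String :=
  let cs := text.toList
  let odds := (PySem.List.slice? cs (some 1) none 2).getD []
  let evens := (PySem.List.slice? cs (some 0) none 2).getD []
  let ret0 := (List.zip odds evens).flatMap (fun p => [p.1, p.2])
  let ret := if cs.length % 2 == 1 then ret0 ++ [PySem.List.pyGetD cs (-1) ' '] else ret0
  -- ret[-1] is in range because Pre_ excludes the empty string
  if PySem.List.pyGetD ret (-1) ' ' == 'F' then
    String.ofList (PySem.List.slice ret (some 2) (some (-1)))
  else
    String.ofList (PySem.List.slice ret (some 2) none)

-- ===== PRECONDITION & SPEC =====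
-- Pre_ excludes only the empty string, on which both A and B raise IndexError (ret[-1] on '').
def Pre_get_phone_py (text : String) : Prop := text ≠ ""
instance (text : String) : Decidable (Pre_get_phone_py text) := by unfold Pre_get_phone_py; infer_instance
def pvWitness_get_phone_py : String := "3180F"
def Spec_get_phone_py (text : String) (out : String) : Prop := out = get_phone_py_alt text
instance (text : String) (out : String) : Decidable (Spec_get_phone_py text out) := by unfold Spec_get_phone_py; infer_instance

-- ===== CLAIM (what is proved, stated in full; the proofs are below) =====
def Claim_equal_get_phone_py : Prop := ∀ (text : String), Dom_get_phone_py text → Pre_get_phone_py text → Spec_get_phone_py text (get_phone_py text)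

-- ===== LEMMAS AND PROOFS =====

/-- the pair-swapped sequence both programs build before the final slicing -/
def swapPairs : List Char → List Char
  | a :: b :: t => b :: a :: swapPairs t
  | l => l

/-- the characters at odd positions, text[1::2] -/
def oddsL : List Char → List Char
  | _ :: b :: t => b :: oddsL t
  | _ => []

/-- the characters at even positions, text[0::2] -/
def evensL : List Char → List Char
  | a :: _ :: t => a :: evensL t
  | [a] => [a]
  | [] => []

theorem core_A : ∀ cs : List Char,
    (List.range ((cs.length + 1) / 2)).flatMap
      (fun k => if 2 * k + 1 < cs.length then
          [cs.getD (2 * k + 1) ' ', cs.getD (2 * k) ' ']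
        else [cs.getD (2 * k) ' ']) = swapPairs cs
  | [] => by simp [swapPairs]
  | [a] => by simp [swapPairs, List.range_succ]
  | a :: b :: t => by
      have ih := core_A t
      have hlen : ((a :: b :: t).length + 1) / 2 = (t.length + 1) / 2 + 1 := by
        simp [List.length_cons]; omega
      rw [hlen, List.range_succ_eq_map, List.flatMap_cons, List.flatMap_map]
      have hstep : (fun k : Nat =>
          if 2 * Nat.succ k + 1 < (a :: b :: t).length then
            [(a :: b :: t).getD (2 * Nat.succ k + 1) ' ', (a :: b :: t).getD (2 * Nat.succ k) ' ']
          else [(a :: b :: t).getD (2 * Nat.succ k) ' '])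
          = (fun k : Nat =>
          if 2 * k + 1 < t.length then
            [t.getD (2 * k + 1) ' ', t.getD (2 * k) ' ']
          else [t.getD (2 * k) ' ']) := by
        funext k
        have e1 : 2 * Nat.succ k + 1 = (2 * k + 1) + 1 + 1 := by omega
        have e2 : 2 * Nat.succ k = (2 * k) + 1 + 1 := by omega
        rw [e1, e2]
        simp only [List.getD_cons_succ]
        have e4 : 2 * k + 1 + 1 + 1 < (a :: b :: t).length ↔ 2 * k + 1 < t.length := by
          simp [List.length_cons]
        simp only [e4]
      rw [hstep, ih, if_pos (by simp [List.length_cons])]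
      simp [swapPairs]

theorem loopA_eq (cs : List Char) :
    (PySem.List.pyRange 0 (cs.length : Int) 2).foldl (fun acc i =>
      if i + 1 < (cs.length : Int) then
        (acc ++ [PySem.List.pyGetD cs (i + 1) ' ']) ++ [PySem.List.pyGetD cs i ' ']
      else
        acc ++ [PySem.List.pyGetD cs i ' ']) ([] : List Char) = swapPairs cs := by
  rw [PySem.List.pyRange_of_pos 0 (cs.length : Int) (by norm_num), List.foldl_map]
  have hbody : (fun (acc : List Char) (k : Nat) =>
      if (0 + 2 * (k : Int)) + 1 < (cs.length : Int) then
        (acc ++ [PySem.List.pyGetD cs ((0 + 2 * (k : Int)) + 1) ' ']) ++ [PySem.List.pyGetD cs (0 + 2 * (k : Int)) ' ']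
      else acc ++ [PySem.List.pyGetD cs (0 + 2 * (k : Int)) ' '])
      = (fun (acc : List Char) (k : Nat) => acc ++
        (if 2 * k + 1 < cs.length then
          [cs.getD (2 * k + 1) ' ', cs.getD (2 * k) ' ']
        else [cs.getD (2 * k) ' '])) := by
    funext acc k
    have h1 : (0 + 2 * (k : Int)) + 1 = ((2 * k + 1 : Nat) : Int) := by push_cast; ring
    have h2 : (0 + 2 * (k : Int)) = ((2 * k : Nat) : Int) := by push_cast; ring
    rw [h1, h2, PySem.List.pyGetD_natCast, PySem.List.pyGetD_natCast]
    simp only [Nat.cast_lt]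
    split <;> first | rfl | simp
  have hcnt : (if (0 : Int) < (cs.length : Int) then (((cs.length : Int) - 0 + 2 - 1) / 2).toNat else 0)
      = (cs.length + 1) / 2 := by
    split <;> omega
  rw [hbody, hcnt, PySem.List.foldl_append_eq_flatMap, List.nil_append]
  exact core_A cs

theorem odds_core : ∀ cs : List Char,
    (List.range (cs.length / 2)).filterMap (fun k => cs[2 * k + 1]?) = oddsL cs
  | [] => by simp [oddsL]
  | [a] => by simp [oddsL]
  | a :: b :: t => by
      have ih := odds_core t
      have hlen : (a :: b :: t).length / 2 = t.length / 2 + 1 := by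
        simp [List.length_cons]; omega
      rw [hlen, List.range_succ_eq_map, List.filterMap_cons, List.filterMap_map]
      have hstep : ((fun k : Nat => (a :: b :: t)[2 * k + 1]?) ∘ Nat.succ)
          = (fun k : Nat => t[2 * k + 1]?) := by
        funext k
        have e : 2 * Nat.succ k + 1 = (2 * k + 1) + 1 + 1 := by omega
        simp only [Function.comp_apply, e]
        simp
      rw [hstep, ih]
      simp [oddsL]

theorem evens_core : ∀ cs : List Char,
    (List.range ((cs.length + 1) / 2)).filterMap (fun k => cs[2 * k]?) = evensL cs
  | [] => by simp [evensL]
  | [a] => by simp [evensL, List.range_succ]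
  | a :: b :: t => by
      have ih := evens_core t
      have hlen : ((a :: b :: t).length + 1) / 2 = (t.length + 1) / 2 + 1 := by
        simp [List.length_cons]; omega
      rw [hlen, List.range_succ_eq_map, List.filterMap_cons, List.filterMap_map]
      have hstep : ((fun k : Nat => (a :: b :: t)[2 * k]?) ∘ Nat.succ)
          = (fun k : Nat => t[2 * k]?) := by
        funext k
        have e : 2 * Nat.succ k = (2 * k) + 1 + 1 := by omega
        simp only [Function.comp_apply, e]
        simp
      rw [hstep, ih]
      simp [evensL]

theorem odds_eq (cs : List Char) :
    (PySem.List.slice? cs (some 1) none 2).getD [] = oddsL cs := by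
  match cs with
  | [] => rfl
  | c :: cs' =>
    have hmin : min (1 : Int) (((c :: cs').length : Int)) = 1 := by
      simp [List.length_cons]
    simp only [PySem.List.slice?, PySem.List.sliceIndices,
      if_neg (by norm_num : ¬(2 : Int) = 0), if_neg (by norm_num : ¬(2 : Int) < 0),
      if_pos (by norm_num : (0 : Int) < 2), if_neg (by norm_num : ¬(1 : Int) < 0), hmin]
    have hcnt : (if (1 : Int) < ((c :: cs').length : Int) then
        ((((c :: cs').length : Int) - 1 + 2 - 1) / 2).toNat else 0) = (c :: cs').length / 2 := by
      split <;> omega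
    have hidx : (fun k : Nat => (c :: cs')[((1 : Int) + 2 * (k : Int)).toNat]?)
        = (fun k : Nat => (c :: cs')[2 * k + 1]?) := by
      funext k
      congr 1
      omega
    rw [hcnt, hidx, Option.getD_some, odds_core]

theorem evens_eq (cs : List Char) :
    (PySem.List.slice? cs (some 0) none 2).getD [] = evensL cs := by
  have hmin : min (0 : Int) ((cs.length : Int)) = 0 := by simp
  simp only [PySem.List.slice?, PySem.List.sliceIndices,
    if_neg (by norm_num : ¬(2 : Int) = 0), if_neg (by norm_num : ¬(2 : Int) < 0),
    if_pos (by norm_num : (0 : Int) < 2), if_neg (by norm_num : ¬(0 : Int) < 0), hmin]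
  have hcnt : (if (0 : Int) < (cs.length : Int) then
      (((cs.length : Int) - 0 + 2 - 1) / 2).toNat else 0) = (cs.length + 1) / 2 := by
    split <;> omega
  have hidx : (fun k : Nat => cs[((0 : Int) + 2 * (k : Int)).toNat]?)
      = (fun k : Nat => cs[2 * k]?) := by
    funext k
    congr 1
    omega
  rw [hcnt, hidx, Option.getD_some, evens_core]

theorem zip_eq : ∀ cs : List Char,
    (if cs.length % 2 == 1 then
        ((List.zip (oddsL cs) (evensL cs)).flatMap (fun p => [p.1, p.2])) ++ [PySem.List.pyGetD cs (-1) ' ']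
      else (List.zip (oddsL cs) (evensL cs)).flatMap (fun p => [p.1, p.2])) = swapPairs cs
  | [] => by simp [oddsL, evensL, swapPairs]
  | [a] => by
      simp [oddsL, evensL, swapPairs, PySem.List.pyGetD_neg_one]
  | a :: b :: t => by
      have ih := zip_eq t
      have hpar : ((a :: b :: t).length % 2 == 1) = (t.length % 2 == 1) := by
        simp [List.length_cons]; omega
      simp only [oddsL, evensL, List.zip_cons_cons, List.flatMap_cons, hpar]
      by_cases hp : t.length % 2 = 1
      · have ht : t ≠ [] := by intro h; subst h; simp at hp
        have hlast : PySem.List.pyGetD (a :: b :: t) (-1) ' ' = PySem.List.pyGetD t (-1) ' ' := by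
          rw [PySem.List.pyGetD_neg_one _ _ (by simp), PySem.List.pyGetD_neg_one _ _ ht]
          rw [List.getLast_cons (by simp), List.getLast_cons ht]
        rw [if_pos (by simp [hp]), hlast]
        rw [if_pos (by simp [hp])] at ih
        simp only [List.cons_append, List.append_assoc] at ih ⊢
        rw [ih]
        simp [swapPairs]
      · rw [if_neg (by simp [hp])]
        rw [if_neg (by simp [hp])] at ih
        simp only [List.cons_append] at ih ⊢
        rw [ih]
        simp [swapPairs]

-- ===== VERDICT (by name: the statement is the Claim_ definition above) =====
theorem get_phone_py_spec : Claim_equal_get_phone_py := by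
  intro text _ _
  unfold Spec_get_phone_py
  simp only [get_phone_py, get_phone_py_alt, loopA_eq, odds_eq, evens_eq, zip_eq]
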